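-- pv_equiv track=rewrite | github.com/smw1988/python-practice | leetcode/p-42.py | calculate
-- ===== SOURCE A (Python) =====
-- def calculate(height, indexList):
--     result = [None] * len(indexList)
--
--     heighest = 0
--     for i in indexList:
--         h = height[i]
--         if (h < heighest):
--             result[i] = heighest - h
--         else:
--             heighest = h
--             result[i] = 0
--
--     return result
-- ===== SOURCE B (Python) =====
-- def calculate(height, indexList):
--     hs = [height[i] for i in indexList]
--     result = [None] * len(indexList)
--     for k, i in enumerate(indexList):
--         result[i] = max(0, *hs[:k + 1]) - hs[k]
--     return result
-- ===== Notes on version B (the rewrite author's own statement) =====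
-- stated objective: alternative
-- what changed: Drops A's running-max accumulator entirely: B gathers hs once and then fills each result slot from the per-index closed form result[i] = max(0, *hs[:k+1]) - hs[k], recomputing the prefix maximum from a slice instead of carrying loop state.
import Mathlib
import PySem

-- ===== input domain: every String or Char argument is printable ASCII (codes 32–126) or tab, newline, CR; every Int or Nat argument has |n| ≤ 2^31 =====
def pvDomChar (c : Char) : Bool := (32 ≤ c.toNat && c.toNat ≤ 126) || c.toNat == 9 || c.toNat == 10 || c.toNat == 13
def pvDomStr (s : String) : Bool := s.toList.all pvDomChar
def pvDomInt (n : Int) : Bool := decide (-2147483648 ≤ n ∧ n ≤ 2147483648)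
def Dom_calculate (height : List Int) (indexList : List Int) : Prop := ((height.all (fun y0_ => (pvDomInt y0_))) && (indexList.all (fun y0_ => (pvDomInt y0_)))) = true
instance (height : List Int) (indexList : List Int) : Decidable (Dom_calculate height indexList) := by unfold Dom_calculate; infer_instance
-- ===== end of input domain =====

-- B drops A's running-max accumulator and fills each result slot from the per-index
-- closed form result[i] = max(0, *hs[:k+1]) - hs[k]; O(n) -> O(n^2), 'alternative'.
-- A and B mutate only their own local list; equivalence is about the return value.


-- ===== PORT A =====
-- for i in indexList: h = height[i]; branch on h < heighest, write result[i].
-- height[i] is ported as (pyGet? …).getD 0 and result[i] = v as pySetD: both are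
-- exact under Pre_calculate, which demands every index in range (Python raises otherwise).
def calculate (height : List Int) (indexList : List Int) : List (Option Int) :=
  (indexList.foldl
    (fun (st : List (Option Int) × Int) (i : Int) =>
      let h := (PySem.List.pyGet? height i).getD 0
      if h < st.2 then
        (PySem.List.pySetD st.1 i (some (st.2 - h)), st.2)
      else
        (PySem.List.pySetD st.1 i (some 0), h))
    (List.replicate indexList.length none, 0)).1

-- ===== PORT B =====
-- hs = [height[i] for i in indexList]; for k, i in enumerate(indexList):
--   result[i] = max(0, *hs[:k+1]) - hs[k]   (max(0,*lst) ported as foldl max 0)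
def calculate_alt (height : List Int) (indexList : List Int) : List (Option Int) :=
  let hs := indexList.map (fun i => (PySem.List.pyGet? height i).getD 0)
  (PySem.List.enumerate indexList 0).foldl
    (fun (r : List (Option Int)) (p : Int × Int) =>
      PySem.List.pySetD r p.2
        (some ((PySem.List.slice hs none (some (p.1 + 1))).foldl max 0
                - (PySem.List.pyGet? hs p.1).getD 0)))
    (List.replicate indexList.length none)

-- ===== PRECONDITION & SPEC =====
-- Pre_ excludes exactly the inputs on which A raises IndexError: every i in indexList
-- must be a valid Python index into height (for height[i]) and into result (length len(indexList)).
def Pre_calculate (height : List Int) (indexList : List Int) : Prop :=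
  ∀ i ∈ indexList, PySem.Raise.InRange height.length i ∧ PySem.Raise.InRange indexList.length i
instance (height : List Int) (indexList : List Int) : Decidable (Pre_calculate height indexList) := by unfold Pre_calculate; infer_instance
def pvWitness_calculate : List Int × List Int := ([3, 1, 2], [0, 2, 1])
def Spec_calculate (height : List Int) (indexList : List Int) (out : List (Option Int)) : Prop := out = calculate_alt height indexList
instance (height : List Int) (indexList : List Int) (out : List (Option Int)) : Decidable (Spec_calculate height indexList out) := by unfold Spec_calculate; infer_instance

-- ===== CLAIM (what is proved, stated in full; the proofs are below) =====
def Claim_equal_calculate : Prop := ∀ (height : List Int) (indexList : List Int), Dom_calculate height indexList → Pre_calculate height indexList → Spec_calculate height indexList (calculate height indexList)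

-- ===== LEMMAS AND PROOFS =====

-- the step function of B's loop, abbreviated for the proofs
def bStep (hs : List Int) (r : List (Option Int)) (p : Int × Int) : List (Option Int) :=
  PySem.List.pySetD r p.2
    (some ((PySem.List.slice hs none (some (p.1 + 1))).foldl max 0
            - (PySem.List.pyGet? hs p.1).getD 0))

-- core invariant: running A's loop over the suffix t with running max = fold of the
-- processed prefix equals running B's loop over the enumerated suffix, for any r.
lemma loops_eq (height : List Int) (pref t : List Int) (r : List (Option Int)) :
    (t.foldl
      (fun (st : List (Option Int) × Int) (i : Int) =>
        let h := (PySem.List.pyGet? height i).getD 0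
        if h < st.2 then
          (PySem.List.pySetD st.1 i (some (st.2 - h)), st.2)
        else
          (PySem.List.pySetD st.1 i (some 0), h))
      (r, (pref.map (fun i => (PySem.List.pyGet? height i).getD 0)).foldl max 0)).1 =
    (PySem.List.enumerate t (pref.length : Int)).foldl
      (bStep ((pref ++ t).map (fun i => (PySem.List.pyGet? height i).getD 0))) r := by
  induction t generalizing pref r with
  | nil => simp [PySem.List.enumerate]
  | cons i t ih =>
    rw [PySem.List.enumerate_cons, List.foldl_cons, List.foldl_cons]
    have hpe : pref ++ i :: t = (pref ++ [i]) ++ t := by simp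
    set h := (PySem.List.pyGet? height i).getD 0 with hh
    set m := (pref.map (fun j => (PySem.List.pyGet? height j).getD 0)).foldl max 0 with hm
    have hs_def : (pref ++ i :: t).map (fun j => (PySem.List.pyGet? height j).getD 0)
        = pref.map (fun j => (PySem.List.pyGet? height j).getD 0)
          ++ h :: t.map (fun j => (PySem.List.pyGet? height j).getD 0) := by
      simp [hh]
    have hslice : PySem.List.slice
        ((pref ++ i :: t).map (fun j => (PySem.List.pyGet? height j).getD 0))
        none (some ((pref.length : Int) + 1))
        = pref.map (fun j => (PySem.List.pyGet? height j).getD 0) ++ [h] := by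
      have hc : ((pref.length : Int) + 1) = ((pref.length + 1 : Nat) : Int) := by push_cast; ring
      rw [hc, PySem.List.slice_to_natCast, hs_def]
      rw [show pref.length + 1
            = (pref.map (fun j => (PySem.List.pyGet? height j).getD 0)).length + 1 by simp]
      rw [List.take_append]
      simp
    have hget : (PySem.List.pyGet?
        ((pref ++ i :: t).map (fun j => (PySem.List.pyGet? height j).getD 0))
        (pref.length : Int)).getD 0 = h := by
      rw [PySem.List.pyGet?_natCast, hs_def]
      rw [List.getElem?_append_right (by simp)]
      simp
    have hmaxfold : (pref.map (fun j => (PySem.List.pyGet? height j).getD 0) ++ [h]).foldl max 0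
        = max m h := by simp [hm]
    have hlen : ((pref.length : Int) + 1) = (((pref ++ [i]).length : Nat) : Int) := by
      simp
    by_cases hlt : h < m
    · have hb : bStep ((pref ++ i :: t).map (fun j => (PySem.List.pyGet? height j).getD 0))
          r ((pref.length : Int), i) = PySem.List.pySetD r i (some (m - h)) := by
        unfold bStep
        rw [hslice, hget, hmaxfold, max_eq_left hlt.le]
      have hm2 : m = ((pref ++ [i]).map (fun j => (PySem.List.pyGet? height j).getD 0)).foldl max 0 := by
        simp only [List.map_append, List.foldl_append, List.map_cons, List.map_nil,
          List.foldl_cons, List.foldl_nil, ← hh, ← hm]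
        exact (max_eq_left hlt.le).symm
      simp only [if_pos hlt]
      rw [hb, hlen, hm2, hpe]
      exact ih (pref ++ [i]) _
    · have hb : bStep ((pref ++ i :: t).map (fun j => (PySem.List.pyGet? height j).getD 0))
          r ((pref.length : Int), i) = PySem.List.pySetD r i (some 0) := by
        unfold bStep
        rw [hslice, hget, hmaxfold, max_eq_right (le_of_not_gt hlt)]
        simp
      have hm2 : h = ((pref ++ [i]).map (fun j => (PySem.List.pyGet? height j).getD 0)).foldl max 0 := by
        simp only [List.map_append, List.foldl_append, List.map_cons, List.map_nil,
          List.foldl_cons, List.foldl_nil, ← hh, ← hm]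
        exact (max_eq_right (le_of_not_gt hlt)).symm
      simp only [if_neg hlt]
      rw [hb, hlen, hm2, hpe]
      exact ih (pref ++ [i]) _

-- ===== VERDICT (by name: the statement is the Claim_ definition above) =====
theorem calculate_spec : Claim_equal_calculate := by
  intro height indexList _ _
  unfold Spec_calculate calculate calculate_alt
  have := loops_eq height [] indexList (List.replicate indexList.length none)
  simpa [bStep] using this
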